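-- pv_equiv track=rewrite | github.com/tushara04/YSP2025_TDCS | notebooks/day4/CaesarPlot.py | CaesarDist
-- ===== SOURCE A (Python) =====
-- def CaesarDist(shift_key, text):
--
--     ciphertext=""
--     text = text.upper()
--     dict_alpha_initial= {'A' : 0, 'B': 0, 'C': 0, 'D': 0, 'E': 0, 'F': 0, 'G':0, 'H':0, 'I':0, 'J':0, 'K':0, 'L':0, 'M':0, 'N':0, 'O':0, 'P':0, 'Q':0, 'R':0, 'S':0, 'T':0, 'U':0, 'V':0, 'W':0, 'X':0, 'Y':0, 'Z':0}
--     dict_alpha_final= {'A' : 0, 'B': 0, 'C': 0, 'D': 0, 'E': 0, 'F': 0, 'G':0, 'H':0, 'I':0, 'J':0, 'K':0, 'L':0, 'M':0, 'N':0, 'O':0, 'P':0, 'Q':0, 'R':0, 'S':0, 'T':0, 'U':0, 'V':0, 'W':0, 'X':0, 'Y':0, 'Z':0}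
--
--     for letter in text:
--         if letter.isalpha():
--             base_val=65
--             cipher_letter=chr(((ord(letter) - base_val + shift_key) % 26) + base_val)
--             # example:letter = C, shift = 27:  67 -65 + 27 = 29 %26 = 3 + 65 = 68 which is D
--
--             ciphertext+= str (cipher_letter)
--
--             dict_alpha_initial[letter]+=1
--             dict_alpha_final[cipher_letter]+=1
--
--         else:
--             ciphertext+=letter
--
--     print (f"Plain Text: {text}\n\nCiper Text: {ciphertext}\n ")
--
--     return dict_alpha_final
-- ===== SOURCE B (Python) =====
-- def CaesarDist(shift_key, text):
--     text = text.upper()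
--     ciphertext = "".join(
--         chr(((ord(c) - 65 + shift_key) % 26) + 65) if c.isalpha() else c
--         for c in text
--     )
--     plain_counts = {}
--     for c in text:
--         if c.isalpha():
--             plain_counts[c] = plain_counts.get(c, 0) + 1
--     print(f"Plain Text: {text}\n\nCiper Text: {ciphertext}\n ")
--     return {chr(65 + j): plain_counts.get(chr(65 + ((j - shift_key) % 26)), 0) for j in range(26)}
-- ===== Notes on version B (the rewrite author's own statement) =====
-- stated objective: alternative
-- what changed: B tallies the plaintext letters into a single dict built with .get() and reads the returned ciphertext histogram off by rotating each key by shift_key in a dict comprehension, instead of A's per-character increments of two pre-initialised 26-key dicts inside the cipher loop.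
import Mathlib
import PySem

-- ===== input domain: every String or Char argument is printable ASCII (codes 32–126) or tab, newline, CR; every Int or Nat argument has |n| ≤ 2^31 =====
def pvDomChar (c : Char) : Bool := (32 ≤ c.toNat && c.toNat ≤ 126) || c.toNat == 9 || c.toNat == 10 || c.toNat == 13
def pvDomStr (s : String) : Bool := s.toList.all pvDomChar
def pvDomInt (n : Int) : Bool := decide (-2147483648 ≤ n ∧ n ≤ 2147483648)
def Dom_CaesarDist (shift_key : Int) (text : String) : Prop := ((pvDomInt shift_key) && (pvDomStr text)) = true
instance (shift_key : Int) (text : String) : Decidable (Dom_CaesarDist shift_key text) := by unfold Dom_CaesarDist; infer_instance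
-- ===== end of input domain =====

-- B tallies the PLAINTEXT letters into one dict and reads the ciphertext histogram off by
-- rotating the key by shift_key, instead of A's per-character updates of two preinitialised
-- 26-key dicts; equivalence is about the RETURN value only (both Pythons print, prints are not ported).

-- ===== PORT A =====
-- the cipher letter chr(((ord(letter) - 65 + shift_key) % 26) + 65)
def caCipher (shift_key : Int) (letter : Char) : Char :=
  Char.ofNat (PySem.Int.mod ((letter.toNat : Int) - 65 + shift_key) 26 + 65).toNat

def caInit : PySem.Dict String Int :=
  PySem.Dict.ofList [("A",0),("B",0),("C",0),("D",0),("E",0),("F",0),("G",0),("H",0),("I",0),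
    ("J",0),("K",0),("L",0),("M",0),("N",0),("O",0),("P",0),("Q",0),("R",0),("S",0),("T",0),
    ("U",0),("V",0),("W",0),("X",0),("Y",0),("Z",0)]

-- A's `d[k] += 1` is ported as `modify k 0 (· + 1)`: the touched keys are always uppercase
-- letters, present in the 26-key dict, so Python never hits a KeyError here.
def CaesarDist (shift_key : Int) (text : String) : List (String × Int) :=
  let t := PySem.Chars.upper text.toList
  let st := t.foldl
    (fun (s : List Char × PySem.Dict String Int × PySem.Dict String Int) letter =>
      if PySem.Chars.isalpha letter then
        let cipher_letter := caCipher shift_key letter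
        (s.1 ++ [cipher_letter],
         (s.2.1).modify (String.singleton letter) 0 (· + 1),
         (s.2.2).modify (String.singleton cipher_letter) 0 (· + 1))
      else (s.1 ++ [letter], s.2.1, s.2.2))
    ([], caInit, caInit)
  st.2.2.items

-- ===== PORT B =====
-- Source B's joined ciphertext feeds only the print and is not ported (prints are side effects).
def CaesarDist_alt (shift_key : Int) (text : String) : List (String × Int) :=
  let t := PySem.Chars.upper text.toList
  let plain_counts := t.foldl
    (fun (d : PySem.Dict String Int) c =>
      if PySem.Chars.isalpha c then
        d.insert (String.singleton c) (d.getD (String.singleton c) 0 + 1)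
      else d)
    PySem.Dict.empty
  (PySem.List.pyRange 0 26 1).map (fun j =>
    (String.singleton (Char.ofNat (65 + j).toNat),
     plain_counts.getD (String.singleton (Char.ofNat (65 + PySem.Int.mod (j - shift_key) 26).toNat)) 0))

-- ===== PRECONDITION & SPEC =====
def Spec_CaesarDist (shift_key : Int) (text : String) (out : List (String × Int)) : Prop := out = CaesarDist_alt shift_key text
instance (shift_key : Int) (text : String) (out : List (String × Int)) : Decidable (Spec_CaesarDist shift_key text out) := by unfold Spec_CaesarDist; infer_instance

-- ===== CLAIM (what is proved, stated in full; the proofs are below) =====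
def Claim_equal_CaesarDist : Prop := ∀ (shift_key : Int) (text : String), Dom_CaesarDist shift_key text → Spec_CaesarDist shift_key text (CaesarDist shift_key text)

-- ===== LEMMAS AND PROOFS =====

-- the 26 uppercase one-letter keys, as A's dict lists them
def caKeys : List String := (List.range 26).map (fun j => String.singleton (Char.ofNat (65 + j)))

theorem char_eq_iff_toNat (a b : Char) : a = b ↔ a.toNat = b.toNat := by
  constructor
  · intro h; rw [h]
  · intro h; exact Char.ext (UInt32.toNat_inj.mp h)

theorem singleton_eq_iff (a b : Char) : String.singleton a = String.singleton b ↔ a = b := by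
  constructor
  · intro h; simpa [String.singleton] using h
  · intro h; rw [h]

-- an alphabetic character of an uppercased list has code 65..90
theorem islower_iff (c : Char) : PySem.Chars.islower c = true ↔ 97 ≤ c.toNat ∧ c.toNat ≤ 122 := by
  simp only [PySem.Chars.islower, Bool.and_eq_true, decide_eq_true_eq, Char.le_def,
    UInt32.le_iff_toNat_le]
  exact ⟨fun ⟨h1, h2⟩ => ⟨h1, h2⟩, fun ⟨h1, h2⟩ => ⟨h1, h2⟩⟩

theorem isupper_iff (c : Char) : PySem.Chars.isupper c = true ↔ 65 ≤ c.toNat ∧ c.toNat ≤ 90 := by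
  simp only [PySem.Chars.isupper, Bool.and_eq_true, decide_eq_true_eq, Char.le_def,
    UInt32.le_iff_toNat_le]
  exact ⟨fun ⟨h1, h2⟩ => ⟨h1, h2⟩, fun ⟨h1, h2⟩ => ⟨h1, h2⟩⟩

-- an alphabetic character of an uppercased list has code 65..90
theorem upper_alpha_range (xs : List Char) (c : Char)
    (hm : c ∈ PySem.Chars.upper xs) (ha : PySem.Chars.isalpha c = true) :
    65 ≤ c.toNat ∧ c.toNat ≤ 90 := by
  rcases List.mem_map.mp hm with ⟨c', _, rfl⟩
  by_cases hl : PySem.Chars.islower c' = true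
  · rcases (islower_iff c').mp hl with ⟨h1, h2⟩
    have hu : PySem.Chars.upperChar c' = Char.ofNat (c'.toNat - 32) := by
      simp [PySem.Chars.upperChar, hl]
    rw [hu, Char.toNat_ofNat, if_pos (Or.inl (by omega))]
    omega
  · have hu : PySem.Chars.upperChar c' = c' := by simp [PySem.Chars.upperChar, hl]
    rw [hu] at ha ⊢
    have : PySem.Chars.isupper c' = true := by
      rcases Bool.or_eq_true_iff.mp (by simpa [PySem.Chars.isalpha] using ha) with h | h
      · exact h
      · exact absurd h hl
    exact (isupper_iff c').mp this

-- A's third fold component is a plain modify-count over the cipher keys of the alpha chars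
theorem A_third (shift_key : Int) (l : List Char)
    (s : List Char × PySem.Dict String Int × PySem.Dict String Int) :
    (l.foldl
      (fun (s : List Char × PySem.Dict String Int × PySem.Dict String Int) letter =>
        if PySem.Chars.isalpha letter then
          let cipher_letter := caCipher shift_key letter
          (s.1 ++ [cipher_letter],
           (s.2.1).modify (String.singleton letter) 0 (· + 1),
           (s.2.2).modify (String.singleton cipher_letter) 0 (· + 1))
        else (s.1 ++ [letter], s.2.1, s.2.2)) s).2.2
    = ((l.filter PySem.Chars.isalpha).map
        (fun c => String.singleton (caCipher shift_key c))).foldl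
        (fun d k => d.modify k 0 (· + 1)) s.2.2 := by
  induction l generalizing s with
  | nil => rfl
  | cons c l ih =>
    by_cases h : PySem.Chars.isalpha c = true
    · simp [h, ih]
    · simp [h, ih]

theorem caInit_keys : caInit.keys = caKeys := by decide

theorem caKeys_nodup : caKeys.Nodup := by decide

theorem caInit_getD_zero : ∀ k ∈ caKeys, caInit.getD k 0 = 0 := by decide

theorem toNat_ofNat_small (n : Nat) (h : n ≤ 1000) : (Char.ofNat n).toNat = n := by
  rw [Char.toNat_ofNat, if_pos (Or.inl (by omega))]

theorem cipher_mem_caKeys (shift_key : Int) (c : Char) :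
    String.singleton (caCipher shift_key c) ∈ caKeys := by
  have h0 : 0 ≤ PySem.Int.mod ((c.toNat : Int) - 65 + shift_key) 26 :=
    PySem.Int.mod_nonneg _ (by norm_num)
  have h1 : PySem.Int.mod ((c.toNat : Int) - 65 + shift_key) 26 < 26 :=
    PySem.Int.mod_lt _ (by norm_num)
  refine List.mem_map.mpr
    ⟨(PySem.Int.mod ((c.toNat : Int) - 65 + shift_key) 26).toNat,
     List.mem_range.mpr (by omega), ?_⟩
  unfold caCipher
  congr 2
  omega

theorem CaesarDist_spec : Claim_equal_CaesarDist := by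
  intro shift_key text _hDom
  unfold Spec_CaesarDist CaesarDist CaesarDist_alt
  simp only []
  rw [A_third]
  rw [show (PySem.Chars.upper text.toList).foldl
        (fun (d : PySem.Dict String Int) c =>
          if PySem.Chars.isalpha c then
            d.insert (String.singleton c) (d.getD (String.singleton c) 0 + 1)
          else d) PySem.Dict.empty
      = ((PySem.Chars.upper text.toList).filter PySem.Chars.isalpha).foldl
          (fun (d : PySem.Dict String Int) c =>
            d.insert (String.singleton c) (d.getD (String.singleton c) 0 + 1))
          PySem.Dict.empty from (List.foldl_filter).symm]
  rw [show (((PySem.Chars.upper text.toList).filter PySem.Chars.isalpha).foldl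
          (fun (d : PySem.Dict String Int) c =>
            d.insert (String.singleton c) (d.getD (String.singleton c) 0 + 1))
          PySem.Dict.empty)
      = ((((PySem.Chars.upper text.toList).filter PySem.Chars.isalpha).map
            String.singleton).foldl
          (fun (d : PySem.Dict String Int) k => d.insert k (d.getD k 0 + 1))
          PySem.Dict.empty) from (List.foldl_map (f := String.singleton)
            (g := fun (d : PySem.Dict String Int) k => d.insert k (d.getD k 0 + 1))).symm]
  have hkeys : ((((PySem.Chars.upper text.toList).filter PySem.Chars.isalpha).map
        (fun c => String.singleton (caCipher shift_key c))).foldl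
        (fun d k => d.modify k 0 (· + 1)) caInit).keys = caKeys := by
    rw [PySem.Dict.keys_foldl_modify _ _ (fun _ _ => (· + 1)), caInit_keys,
      PySem.Set.update_eq_append_filter]
    have hnil : (PySem.Set.ofList
        (((PySem.Chars.upper text.toList).filter PySem.Chars.isalpha).map
          (fun c => String.singleton (caCipher shift_key c)))).filter
        (fun y => !PySem.Set.contains caKeys y) = [] := by
      apply List.filter_eq_nil_iff.mpr
      intro y hy
      have hyL := (PySem.Set.mem_ofList _ _).mp hy
      rcases List.mem_map.mp hyL with ⟨c, _, rfl⟩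
      simp [cipher_mem_caKeys shift_key c]
    rw [hnil, List.append_nil]
  have hnodup : ((((PySem.Chars.upper text.toList).filter PySem.Chars.isalpha).map
        (fun c => String.singleton (caCipher shift_key c))).foldl
        (fun d k => d.modify k 0 (· + 1)) caInit).keys.Nodup := by
    rw [hkeys]; exact caKeys_nodup
  rw [PySem.Dict.items_eq_map_keys _ hnodup 0, hkeys]
  apply List.ext_getElem
  · simp [caKeys, PySem.List.length_pyRange_one]
  intro j h1 h2
  have hj26 : j < 26 := by
    simpa [caKeys] using h1
  simp only [List.getElem_map, caKeys, List.getElem_range,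
    PySem.List.getElem_pyRange_one, zero_add, Prod.mk.injEq]
  have hm0 : 0 ≤ PySem.Int.mod ((j : Int) - shift_key) 26 :=
    PySem.Int.mod_nonneg _ (by norm_num)
  have hm1 : PySem.Int.mod ((j : Int) - shift_key) 26 < 26 :=
    PySem.Int.mod_lt _ (by norm_num)
  constructor
  · congr 1
  · rw [PySem.Dict.getD_foldl_modify_add_one, PySem.Dict.getD_foldl_insert_add_one,
      caInit_getD_zero _ (List.mem_map.mpr ⟨j, List.mem_range.mpr hj26, rfl⟩), PySem.Dict.getD_empty]
    simp only [zero_add]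
    congr 1
    rw [List.count_eq_countP, List.count_eq_countP, List.countP_map, List.countP_map]
    apply List.countP_congr
    intro c hc
    have hct := List.mem_filter.mp hc
    have hrange := upper_alpha_range _ _ hct.1 hct.2
    simp only [Function.comp_apply, beq_iff_eq]
    unfold caCipher
    have h0 : 0 ≤ PySem.Int.mod ((c.toNat : Int) - 65 + shift_key) 26 :=
      PySem.Int.mod_nonneg _ (by norm_num)
    have h1 : PySem.Int.mod ((c.toNat : Int) - 65 + shift_key) 26 < 26 :=
      PySem.Int.mod_lt _ (by norm_num)
    rw [singleton_eq_iff, singleton_eq_iff, char_eq_iff_toNat, char_eq_iff_toNat,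
      toNat_ofNat_small _ (by omega), toNat_ofNat_small _ (by omega),
      toNat_ofNat_small _ (by omega)]
    simp only [PySem.Int.mod_eq_emod_of_pos (by norm_num : (0:Int) < 26)] at *
    omega
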